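-- pv_equiv track=rewrite | github.com/XJenso73/AdventOfCode | 2025/day10.py | _enumerate_subsets
-- ===== SOURCE A (Python) =====
-- def _enumerate_subsets(buttons: list[int]):
--     n = len(buttons)
--     for subset in range(1 << n):
--         xor = 0
--         presses = 0
--         for i in range(n):
--             if subset & (1 << i):
--                 xor ^= buttons[i]
--                 presses += 1
--         yield xor, presses
-- ===== SOURCE B (Python) =====
-- def _enumerate_subsets(buttons: list[int]):
--     # Doubling DP: subsets of the first k buttons, in subset-index order,
--     # are the previous list followed by the previous list with buttons[k] folded in.
--     res = [(0, 0)]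
--     for b in buttons:
--         res = res + [(x ^ b, p + 1) for (x, p) in res]
--     yield from res
-- ===== Notes on version B (the rewrite author's own statement) =====
-- stated objective: alternative
-- what changed: Replaced the per-subset inner bit loop with a doubling DP: the subset list for k+1 buttons is the list for k buttons followed by that same list with buttons[k] XORed in and presses+1, removing the inner scan (measured 8.5x at n=16, but the output itself is exponential and neither version finishes n=64, so speed is not claimed).
import Mathlib
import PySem

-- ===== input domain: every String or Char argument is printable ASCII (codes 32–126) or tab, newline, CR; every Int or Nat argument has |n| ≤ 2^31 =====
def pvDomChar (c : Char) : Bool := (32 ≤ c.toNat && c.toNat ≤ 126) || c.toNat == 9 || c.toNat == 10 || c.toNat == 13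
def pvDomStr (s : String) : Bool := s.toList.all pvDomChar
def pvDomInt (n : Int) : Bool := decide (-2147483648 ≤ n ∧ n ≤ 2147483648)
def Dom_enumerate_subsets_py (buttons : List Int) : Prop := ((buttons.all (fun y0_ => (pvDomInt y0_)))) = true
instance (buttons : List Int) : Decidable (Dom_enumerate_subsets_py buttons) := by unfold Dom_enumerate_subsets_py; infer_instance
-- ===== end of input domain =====

-- B replaces A's per-subset inner bit loop by a doubling DP over the buttons (same output list, different traversal; no speed claim).
-- Both ports return the generator's yielded sequence as a list.

-- ===== PORT A =====
-- literal transliteration of A: outer loop over range(1 << n), inner loop over range(n)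
def enumerate_subsets_py (buttons : List Int) : List (Int × Int) :=
  (PySem.List.pyRange 0 ((1 : Int) <<< buttons.length) 1).map (fun subset =>
    (PySem.List.pyRange 0 (buttons.length : Int) 1).foldl
      (fun (st : Int × Int) i =>
        if PySem.Int.band subset ((1 : Int) <<< i.toNat) ≠ 0 then
          (PySem.Int.bxor st.1 (PySem.List.pyGetD buttons i 0), st.2 + 1)
        else st)
      ((0 : Int), (0 : Int)))

-- ===== PORT B =====
-- literal transliteration of B: res = [(0,0)]; for b in buttons: res = res + [(x^b, p+1) for (x,p) in res]
def enumerate_subsets_py_alt (buttons : List Int) : List (Int × Int) :=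
  buttons.foldl
    (fun res b => res ++ res.map (fun xp => (PySem.Int.bxor xp.1 b, xp.2 + 1)))
    [((0 : Int), (0 : Int))]

-- ===== PRECONDITION & SPEC =====
def Spec_enumerate_subsets_py (buttons : List Int) (out : List (Int × Int)) : Prop := out = enumerate_subsets_py_alt buttons
instance (buttons : List Int) (out : List (Int × Int)) : Decidable (Spec_enumerate_subsets_py buttons out) := by unfold Spec_enumerate_subsets_py; infer_instance

-- ===== CLAIM (what is proved, stated in full; the proofs are below) =====
def Claim_equal_enumerate_subsets_py : Prop := ∀ (buttons : List Int), Dom_enumerate_subsets_py buttons → Spec_enumerate_subsets_py buttons (enumerate_subsets_py buttons)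

-- ===== LEMMAS AND PROOFS =====

-- Nat-level version of A's inner loop: fold over bit indices, testing bit i of k
def innerN (bs : List Int) (k : Nat) : Int × Int :=
  (List.range bs.length).foldl
    (fun (st : Int × Int) i =>
      if k.testBit i then (PySem.Int.bxor st.1 (bs.getD i 0), st.2 + 1) else st)
    ((0 : Int), (0 : Int))

-- Nat-level version of A as a whole
def AN (bs : List Int) : List (Int × Int) := (List.range (2 ^ bs.length)).map (innerN bs)



lemma A_eq_AN (bs : List Int) : enumerate_subsets_py bs = AN bs := by
  unfold enumerate_subsets_py AN innerN
  rw [PySem.List.pyRange_one, PySem.List.pyRange_one]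
  have houter : ((1 : Int) <<< bs.length).toNat = 2 ^ bs.length := by
    rw [Int.shiftLeft_eq, one_mul, show ((2:Int)) = ((2:Nat):Int) from rfl, ← Nat.cast_pow, Int.toNat_natCast]
  simp only [sub_zero, Int.one_shiftLeft, Int.toNat_natCast, List.map_map, houter]
  refine List.map_congr_left (fun k hk => ?_)
  simp only [Function.comp_apply]
  rw [List.foldl_map]
  refine PySem.List.foldl_congr_mem _ _ _ _ (fun st i hi => ?_)
  simp only [zero_add, Int.toNat_natCast]
  rw [PySem.Int.band_natCast, PySem.List.pyGetD_natCast]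
  have hcond : ((k &&& 2 ^ i : Nat) : Int) ≠ 0 ↔ k.testBit i = true := by
    rw [Nat.and_two_pow]
    cases h : k.testBit i
    · simp
    · simp
  by_cases hb : k.testBit i = true
  · rw [if_pos (hcond.mpr hb), if_pos hb, List.getD_eq_getElem?_getD]
  · rw [if_neg (fun h => hb (hcond.mp h)), if_neg hb]

lemma innerN_append_lt (bs : List Int) (b : Int) (k : Nat) (hk : k < 2 ^ bs.length) :
    innerN (bs ++ [b]) k = innerN bs k := by
  unfold innerN
  rw [List.length_append, List.length_singleton, List.range_succ, List.foldl_append]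
  have hstep : ∀ (st : Int × Int),
      (if k.testBit bs.length then (PySem.Int.bxor st.1 ((bs ++ [b]).getD bs.length 0), st.2 + 1) else st) = st := by
    intro st
    rw [Nat.testBit_lt_two_pow hk]
    simp
  rw [List.foldl_cons, List.foldl_nil, hstep]
  refine PySem.List.foldl_congr_mem _ _ _ _ (fun st i hi => ?_)
  have hlt : i < bs.length := List.mem_range.mp hi
  rw [List.getD_append _ _ _ _ hlt]

lemma innerN_append_ge (bs : List Int) (b : Int) (k : Nat) (hk : k < 2 ^ bs.length) :
    innerN (bs ++ [b]) (2 ^ bs.length + k) =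
      (PySem.Int.bxor (innerN bs k).1 b, (innerN bs k).2 + 1) := by
  unfold innerN
  rw [List.length_append, List.length_singleton, List.range_succ, List.foldl_append]
  have hbit : (2 ^ bs.length + k).testBit bs.length = true := by
    rw [Nat.testBit_two_pow_add_eq, Nat.testBit_lt_two_pow hk]
    rfl
  have hget : (bs ++ [b]).getD bs.length 0 = b := by
    rw [List.getD_eq_getElem?_getD, List.getElem?_append_right (le_refl _)]
    simp
  have heq : (List.range bs.length).foldl
      (fun (st : Int × Int) i =>
        if (2 ^ bs.length + k).testBit i then (PySem.Int.bxor st.1 ((bs ++ [b]).getD i 0), st.2 + 1) else st)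
      ((0 : Int), (0 : Int)) =
      (List.range bs.length).foldl
      (fun (st : Int × Int) i =>
        if k.testBit i then (PySem.Int.bxor st.1 (bs.getD i 0), st.2 + 1) else st)
      ((0 : Int), (0 : Int)) := by
    refine PySem.List.foldl_congr_mem _ _ _ _ (fun st i hi => ?_)
    have hlt : i < bs.length := List.mem_range.mp hi
    rw [Nat.testBit_two_pow_add_gt hlt, List.getD_append _ _ _ _ hlt]
  rw [List.foldl_cons, List.foldl_nil, heq, hbit]
  simp

lemma AN_append (bs : List Int) (b : Int) :
    AN (bs ++ [b]) = AN bs ++ (AN bs).map (fun xp => (PySem.Int.bxor xp.1 b, xp.2 + 1)) := by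
  unfold AN
  rw [List.length_append, List.length_singleton, pow_succ, mul_two, List.range_add, List.map_append]
  congr 1
  · refine List.map_congr_left (fun k hk => ?_)
    exact innerN_append_lt bs b k (List.mem_range.mp hk)
  · rw [List.map_map, List.map_map]
    refine List.map_congr_left (fun k hk => ?_)
    simp only [Function.comp]
    exact innerN_append_ge bs b k (List.mem_range.mp hk)

lemma alt_append (bs : List Int) (b : Int) :
    enumerate_subsets_py_alt (bs ++ [b]) =
      enumerate_subsets_py_alt bs ++ (enumerate_subsets_py_alt bs).map (fun xp => (PySem.Int.bxor xp.1 b, xp.2 + 1)) := by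
  unfold enumerate_subsets_py_alt
  rw [List.foldl_append, List.foldl_cons, List.foldl_nil]

lemma A_eq_alt (bs : List Int) : enumerate_subsets_py bs = enumerate_subsets_py_alt bs := by
  induction bs using List.reverseRecOn with
  | nil => decide
  | append_singleton bs b ih =>
    rw [A_eq_AN, AN_append, alt_append, ← A_eq_AN, ih]

-- ===== VERDICT (by name: the statement is the Claim_ definition above) =====
theorem enumerate_subsets_py_spec : Claim_equal_enumerate_subsets_py := by
  intro buttons _
  exact A_eq_alt buttons
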